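-- pv_equiv track=rewrite | github.com/hani1281/hani | unified_nlp_toolkit.py | md_escape_first_char
-- ===== SOURCE A (Python) =====
-- MD_SPECIALS = ("*", "_", "#", ">", "`")
--
-- def md_escape_first_char(s: str) -> str:
--     out_lines = []
--     for ln in s.replace("\r", "").split("\n"):
--         if ln and ln[0] in MD_SPECIALS:
--             out_lines.append("\\" + ln)
--         else:
--             out_lines.append(ln)
--     return "\n".join(out_lines)
-- ===== SOURCE B (Python) =====
-- MD_SPECIALS = ("*", "_", "#", ">", "`")
--
-- def md_escape_first_char(s: str) -> str:
--     # single character-level pass with a line-start flag; no split/join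
--     out = []
--     start = True
--     for c in s:
--         if c == "\r":
--             continue
--         if start and c in MD_SPECIALS:
--             out.append("\\")
--         out.append(c)
--         start = c == "\n"
--     return "".join(out)
-- ===== Notes on version B (the rewrite author's own statement) =====
-- stated objective: alternative
-- what changed: a single character-level state-machine pass with a line-start flag (skipping \r inline) replaces A's replace/split/per-line-test/join pipeline
import Mathlib
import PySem

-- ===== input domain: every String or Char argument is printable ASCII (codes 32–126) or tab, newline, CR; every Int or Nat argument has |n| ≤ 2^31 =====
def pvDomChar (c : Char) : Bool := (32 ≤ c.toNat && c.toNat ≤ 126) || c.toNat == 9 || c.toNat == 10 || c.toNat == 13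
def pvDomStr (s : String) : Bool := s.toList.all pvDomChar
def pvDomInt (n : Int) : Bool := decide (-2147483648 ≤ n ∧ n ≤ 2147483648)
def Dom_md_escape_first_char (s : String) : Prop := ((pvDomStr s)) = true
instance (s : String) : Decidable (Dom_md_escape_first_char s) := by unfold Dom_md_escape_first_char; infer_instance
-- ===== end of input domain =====

-- B replaces A's replace/split/per-line-test/join pipeline by a single
-- character-level scan with a line-start flag (alternative decomposition).


-- MD_SPECIALS = ("*", "_", "#", ">", "`")  (module-level constant used by both versions)
def mdSpecials : List Char := ['*', '_', '#', '>', '`']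

-- ===== PORT A =====
-- literal port of A: strip '\r', split on '\n', loop appending the escaped line, join
def md_escape_first_char (s : String) : String :=
  let t := PySem.Chars.replace s.toList ['\r'] []
  let lines := PySem.Chars.splitOn t ['\n']
  let out_lines := lines.foldl (fun acc ln =>
    match ln with
    | c :: _ => if mdSpecials.contains c then acc ++ ['\\' :: ln] else acc ++ [ln]
    | [] => acc ++ [ln]) []
  String.mk (PySem.Chars.join ['\n'] out_lines)

-- ===== PORT B =====
-- literal port of B: one pass, `start` flag, accumulator `out`
def mdAltGo : List Char → Bool → List Char → List Char
  | [], _, out => out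
  | c :: t, start, out =>
    if c = '\r' then mdAltGo t start out
    else mdAltGo t (c == '\n')
      (out ++ (if start && mdSpecials.contains c then ['\\', c] else [c]))

def md_escape_first_char_alt (s : String) : String :=
  String.mk (mdAltGo s.toList true [])

-- ===== PRECONDITION & SPEC =====
def Spec_md_escape_first_char (s : String) (out : String) : Prop := out = md_escape_first_char_alt s
instance (s : String) (out : String) : Decidable (Spec_md_escape_first_char s out) := by unfold Spec_md_escape_first_char; infer_instance

-- ===== CLAIM (what is proved, stated in full; the proofs are below) =====
def Claim_equal_md_escape_first_char : Prop := ∀ (s : String), Dom_md_escape_first_char s → Spec_md_escape_first_char s (md_escape_first_char s)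

-- ===== LEMMAS AND PROOFS =====

-- reference splitter: (first line, remaining lines) of a '\n'-split
def pySplitP : List Char → List Char × List (List Char)
  | [] => ([], [])
  | c :: t =>
    let p := pySplitP t
    if c = '\n' then ([], p.1 :: p.2) else (c :: p.1, p.2)

-- the per-line escape A applies
def escL : List Char → List Char
  | [] => []
  | c :: t => if mdSpecials.contains c then '\\' :: c :: t else c :: t

theorem replace_cr_go (fuel : Nat) : ∀ (l acc : List Char), l.length ≤ fuel →
    PySem.Chars.replace.go ['\r'] [] fuel l acc = acc.reverse ++ l.filter (· ≠ '\r') := by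
  induction fuel with
  | zero =>
    intro l acc h
    have : l = [] := List.eq_nil_of_length_eq_zero (Nat.le_zero.mp h)
    subst this
    simp [PySem.Chars.replace.go]
  | succ n ih =>
    intro l acc h
    cases l with
    | nil => simp [PySem.Chars.replace.go]
    | cons c t =>
      by_cases hc : c = '\r'
      · subst hc
        have hpre : (['\r'] : List Char).isPrefixOf ('\r' :: t) = true := by
          simp [List.isPrefixOf]
        simp only [PySem.Chars.replace.go, hpre, if_pos]
        rw [show List.drop (['\r'] : List Char).length ('\r' :: t) = t from rfl]
        rw [ih t _ (Nat.le_of_succ_le_succ (by simpa using h))]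
        simp
      · have hpre : (['\r'] : List Char).isPrefixOf (c :: t) = false := by
          simp only [List.isPrefixOf, List.isPrefixOf_nil_left, Bool.and_true, beq_iff_eq,
            decide_eq_false_iff_not]
          exact beq_eq_false_iff_ne.mpr fun hh => hc (Eq.symm hh)
        simp only [PySem.Chars.replace.go, hpre]
        rw [if_neg (by simp)]
        rw [ih t _ (Nat.le_of_succ_le_succ (by simpa using h))]
        simp [hc]

theorem splitOn_go (fuel : Nat) : ∀ (l cur : List Char) (acc : List (List Char)), l.length ≤ fuel →
    PySem.Chars.splitOn.go ['\n'] fuel l cur acc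
      = acc.reverse ++ ((cur.reverse ++ (pySplitP l).1) :: (pySplitP l).2) := by
  induction fuel with
  | zero =>
    intro l cur acc h
    have : l = [] := List.eq_nil_of_length_eq_zero (Nat.le_zero.mp h)
    subst this
    simp [PySem.Chars.splitOn.go, pySplitP]
  | succ n ih =>
    intro l cur acc h
    cases l with
    | nil => simp [PySem.Chars.splitOn.go, pySplitP]
    | cons c t =>
      by_cases hc : c = '\n'
      · subst hc
        have hpre : (['\n'] : List Char).isPrefixOf ('\n' :: t) = true := by
          simp [List.isPrefixOf]
        simp only [PySem.Chars.splitOn.go, hpre, if_pos]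
        rw [show List.drop (['\n'] : List Char).length ('\n' :: t) = t from rfl]
        rw [ih t [] _ (Nat.le_of_succ_le_succ (by simpa using h))]
        simp [pySplitP]
      · have hpre : (['\n'] : List Char).isPrefixOf (c :: t) = false := by
          simp only [List.isPrefixOf, List.isPrefixOf_nil_left, Bool.and_true, beq_iff_eq,
            decide_eq_false_iff_not]
          exact beq_eq_false_iff_ne.mpr fun hh => hc (Eq.symm hh)
        simp only [PySem.Chars.splitOn.go, hpre]
        rw [if_neg (by simp)]
        rw [ih t (c :: cur) acc (Nat.le_of_succ_le_succ (by simpa using h))]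
        simp [pySplitP, hc]

-- A's loop body equals escL pointwise
theorem loop_body_eq_escL :
    (fun (acc : List (List Char)) (ln : List Char) =>
      match ln with
      | c :: _ => if mdSpecials.contains c then acc ++ ['\\' :: ln] else acc ++ [ln]
      | [] => acc ++ [ln])
    = (fun acc ln => acc ++ [escL ln]) := by
  funext acc ln
  cases ln with
  | nil => simp [escL]
  | cons c t => by_cases hc : c ∈ mdSpecials <;> simp [escL, hc]

theorem foldl_escL (lines : List (List Char)) : ∀ acc,
    lines.foldl (fun acc ln => acc ++ [escL ln]) acc = acc ++ lines.map escL := by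
  induction lines with
  | nil => intro acc; simp
  | cons ln rest ih => intro acc; simp [List.foldl, ih]

theorem join_newline (rest : List (List Char)) : ∀ a,
    PySem.Chars.join ['\n'] (a :: rest) = a ++ (rest.map (fun l => '\n' :: l)).flatten := by
  induction rest with
  | nil => intro a; simp [PySem.Chars.join_singleton]
  | cons b t ih =>
    intro a
    rw [PySem.Chars.join_cons_cons, ih b]
    simp

-- skipping '\r' inline equals filtering it out first
theorem mdAltGo_filter (cs : List Char) : ∀ (start : Bool) (out : List Char),
    mdAltGo cs start out = mdAltGo (cs.filter (· ≠ '\r')) start out := by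
  induction cs with
  | nil => intro start out; simp
  | cons c t ih =>
    intro start out
    by_cases hc : c = '\r'
    · subst hc; simp [mdAltGo, ih]
    · simp [mdAltGo, hc, ih]

theorem mdAltGo_cons (c : Char) (t : List Char) (start : Bool) (out : List Char) :
    mdAltGo (c :: t) start out
      = if c = '\r' then mdAltGo t start out
        else mdAltGo t (c == '\n')
          (out ++ (if start && mdSpecials.contains c then ['\\', c] else [c])) := rfl

-- the scan computes A's escape-join on a CR-free list
theorem mdAltGo_spec (cs : List Char) : ∀ (start : Bool) (out : List Char), '\r' ∉ cs →
    mdAltGo cs start out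
      = out ++ (if start then escL (pySplitP cs).1 else (pySplitP cs).1)
            ++ ((pySplitP cs).2.map (fun l => '\n' :: escL l)).flatten := by
  induction cs with
  | nil => intro start out _; cases start <;> simp [mdAltGo, pySplitP, escL]
  | cons c t ih =>
    intro start out hcr
    have hcr' : '\r' ∉ t := fun h => hcr (List.mem_cons_of_mem _ h)
    have hc : ¬ c = '\r' := fun h => hcr (h ▸ List.mem_cons_self ..)
    by_cases hn : c = '\n'
    · subst hn
      rw [mdAltGo_cons, if_neg hc,
          show mdSpecials.contains '\n' = false from by decide]
      simp only [Bool.and_false, Bool.false_eq_true, if_false, beq_self_eq_true]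
      rw [ih true (out ++ ['\n']) hcr']
      cases start <;> simp [pySplitP, escL]
    · rw [mdAltGo_cons, if_neg hc]
      have hb : (c == '\n') = false := by simpa using hn
      rw [hb, ih false _ hcr']
      cases start
      · simp [pySplitP, hn]
      · by_cases hs : c ∈ mdSpecials
        · simp [pySplitP, hn, hs, escL]
        · simp [pySplitP, hn, hs, escL]

-- ===== VERDICT (by name: the statement is the Claim_ definition above) =====
theorem md_escape_first_char_spec : Claim_equal_md_escape_first_char := by
  intro s _
  unfold Spec_md_escape_first_char md_escape_first_char md_escape_first_char_alt
  dsimp only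
  set cs := s.toList with hcs
  have hrepl : PySem.Chars.replace cs ['\r'] [] = cs.filter (· ≠ '\r') := by
    rw [PySem.Chars.replace]
    rw [if_neg (by decide)]
    rw [replace_cr_go cs.length cs [] le_rfl]
    simp
  set g := cs.filter (· ≠ '\r') with hgdef
  have hsplit : PySem.Chars.splitOn (PySem.Chars.replace cs ['\r'] []) ['\n']
      = (pySplitP g).1 :: (pySplitP g).2 := by
    rw [hrepl, PySem.Chars.splitOn]
    rw [splitOn_go (g.length + 1) g [] [] (Nat.le_succ _)]
    simp
  have hcrfree : '\r' ∉ g := by simp [hgdef]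
  congr 1
  rw [hsplit, loop_body_eq_escL, foldl_escL, mdAltGo_filter, ← hgdef,
      mdAltGo_spec g true [] hcrfree]
  simp only [List.nil_append, List.map_cons, if_true]
  rw [join_newline]
  simp [List.map_map, Function.comp_def]
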